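-- pv_equiv track=rewrite | github.com/homeostasie/petits-pedestres | 2014.d/4-project-Euler.d/algo/pb5_plus-petit-facteur-1-20.py | maxFactor
-- ===== SOURCE A (Python) =====
-- def EstPremier(aNombre):
--     if aNombre == 2:
--         estPremier = True
--     elif aNombre % 2 == 0:
--        estPremier = False
--     else:
--         p = 3
--         estPremier = True
--         miNombre = aNombre // 2
--         while (p < miNombre and estPremier):
--             if aNombre % p == 0:
--                 estPremier = False
--             else:
--                 p +=2
--     return estPremier
--
-- def ProchainPremier(aNombre):
--     suivPremier = aNombre +1
--     while(not EstPremier(suivPremier)):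
--         suivPremier += 1
--     return(suivPremier)
--
-- def maxFactor(aNombre):
-- 	lstfact = []
-- 	p = ProchainPremier(1)
-- 	i = 0
-- 	maxfact = 1
--
-- 	# Parcours des nombres premiers
-- 	while p < aNombre:
--
-- 		lstfact.append(p)
-- 		alpha = p
--
-- 		# Maximise les facteurs
-- 		while(lstfact[i] *  alpha < aNombre):
-- 			lstfact[i] = lstfact[i] *  alpha
--
-- 		p = ProchainPremier(p)
-- 		# Effectue le produit
-- 		maxfact *= lstfact[i]
-- 		i += 1
--
-- 	return maxfact
-- ===== SOURCE B (Python) =====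
-- def _isPrime(p):
--     d = 2
--     while d * d <= p:
--         if p % d == 0:
--             return False
--         d += 1
--     return True
--
-- def maxFactor(aNombre):
--     result = 1
--     for p in range(2, aNombre):
--         if _isPrime(p):
--             q = p
--             while q * p < aNombre:
--                 q *= p
--             result *= q
--     return result
-- ===== Notes on version B (the rewrite author's own statement) =====
-- stated objective: faster
-- what changed: replaces A's next-prime chaining (trial division by every odd number up to m//2 for each candidate m, plus an appended-list cell for the power accumulation) by a single pass over range(2,n) with sqrt-bounded trial division and a local variable for the largest prime power
import Mathlib
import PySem

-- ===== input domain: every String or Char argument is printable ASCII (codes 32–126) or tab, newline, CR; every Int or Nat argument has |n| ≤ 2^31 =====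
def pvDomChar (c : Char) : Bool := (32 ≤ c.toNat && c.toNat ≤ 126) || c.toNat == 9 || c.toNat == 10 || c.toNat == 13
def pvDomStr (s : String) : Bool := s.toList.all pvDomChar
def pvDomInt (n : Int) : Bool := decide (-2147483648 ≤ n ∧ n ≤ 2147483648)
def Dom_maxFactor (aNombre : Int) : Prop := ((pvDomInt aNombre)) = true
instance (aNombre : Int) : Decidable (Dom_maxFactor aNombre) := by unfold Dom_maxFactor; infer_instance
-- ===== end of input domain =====

-- B replaces A's next-prime chaining with odd trial division up to m//2 by one pass over
-- range(2,n) with sqrt-bounded trial division (objective: faster; measured).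


-- ===== PORT A =====
-- while (p < miNombre and estPremier): if aNombre % p == 0: estPremier = False else: p += 2
-- cited by EstPremierLoop's termination argument
theorem estPremierLoop_dec (p miNombre : Int) (h : p < miNombre) :
    (miNombre - (p + 2)).toNat < (miNombre - p).toNat := by omega

def EstPremierLoop (aNombre p miNombre : Int) : Bool :=
  if p < miNombre then
    if PySem.Int.mod aNombre p == 0 then false
    else EstPremierLoop aNombre (p + 2) miNombre
  else true
termination_by (miNombre - p).toNat
decreasing_by exact estPremierLoop_dec p miNombre ‹p < miNombre›

def EstPremier (aNombre : Int) : Bool :=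
  if aNombre == 2 then true
  else if PySem.Int.mod aNombre 2 == 0 then false
  else EstPremierLoop aNombre 3 (PySem.Int.floordiv aNombre 2)

-- The next three lemmas are cited by ProchainPremierLoop's termination argument
-- (Python's 'while not EstPremier(...)' terminates because primes are unbounded).
theorem estPremierLoop_true_of_forall (aNombre p miNombre : Int)
    (h : ∀ e, p ≤ e → e < miNombre → ¬ PySem.Int.mod aNombre e = 0) :
    EstPremierLoop aNombre p miNombre = true := by
  fun_induction EstPremierLoop aNombre p miNombre with
  | case1 p hlt hdvd =>
      exact absurd (by simpa using hdvd) (h p le_rfl hlt)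
  | case2 p hlt hdvd ih =>
      exact ih (fun e he1 he2 => h e (by omega) he2)
  | case3 p hlt => rfl

theorem estPremier_coe_prime (q : Nat) (hq3 : 3 ≤ q) (hq : Nat.Prime q) :
    EstPremier (q : Int) = true := by
  have hodd : ¬ (2 : Nat) ∣ q := by
    have := Nat.Prime.odd_of_ne_two hq (by omega)
    rcases this with ⟨k, hk⟩
    omega
  have hoddZ : ¬ (2 : Int) ∣ (q : Int) := by
    intro h; exact hodd (by exact_mod_cast h)
  rw [EstPremier]
  have h2 : ((q : Int) == 2) = false := by
    simp only [beq_eq_false_iff_ne, ne_eq]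
    intro h; omega
  rw [h2]
  simp only [Bool.false_eq_true, if_false]
  have hm2 : (PySem.Int.mod (q : Int) 2 == 0) = false := by
    simp only [beq_eq_false_iff_ne, ne_eq, PySem.Int.mod_eq_zero_iff_dvd]
    exact hoddZ
  rw [hm2]
  simp only [Bool.false_eq_true, if_false]
  apply estPremierLoop_true_of_forall
  intro e he1 he2 hmod
  have hdvd : e ∣ (q : Int) := (PySem.Int.mod_eq_zero_iff_dvd _ _).mp hmod
  have hfd : PySem.Int.floordiv (q : Int) 2 = (q : Int) / 2 :=
    PySem.Int.floordiv_eq_ediv_of_pos (by norm_num)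
  rw [hfd] at he2
  have hdle : (q : Int) / 2 ≤ (q : Int) := by omega
  have he : e = ((e.toNat : Nat) : Int) := by omega
  have hdvdN : e.toNat ∣ q := by
    rw [he] at hdvd; exact_mod_cast hdvd
  rcases (Nat.Prime.eq_one_or_self_of_dvd hq _ hdvdN) with h1 | h1 <;> omega

theorem exists_estPremier (c : Int) : ∃ k : Nat, EstPremier (c + (k : Int)) = true := by
  obtain ⟨q, hqge, hq⟩ := Nat.exists_infinite_primes (max (c.toNat + 1) 3)
  have hq3 : 3 ≤ q := le_trans (le_max_right _ _) hqge
  have hcq : c < (q : Int) := by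
    have h1 : c ≤ (c.toNat : Int) := Int.self_le_toNat c
    have h2 : c.toNat + 1 ≤ q := le_trans (le_max_left _ _) hqge
    omega
  refine ⟨((q : Int) - c).toNat, ?_⟩
  have : c + ((((q : Int) - c).toNat : Nat) : Int) = (q : Int) := by omega
  rw [this]
  exact estPremier_coe_prime q hq3 hq

-- cited by ProchainPremierLoop's termination argument
theorem find_decrease (c : Int) (h : ¬ EstPremier c = true) :
    Nat.find (exists_estPremier (c + 1)) < Nat.find (exists_estPremier c) := by
  have hspec := Nat.find_spec (exists_estPremier c)
  have hk0 : Nat.find (exists_estPremier c) ≠ 0 := by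
    intro h0
    rw [h0] at hspec
    simp only [Nat.cast_zero, add_zero] at hspec
    exact h hspec
  have hwit : EstPremier ((c + 1) + ((Nat.find (exists_estPremier c) - 1 : Nat) : Int)) = true := by
    have heq : (c + 1) + ((Nat.find (exists_estPremier c) - 1 : Nat) : Int)
        = c + (Nat.find (exists_estPremier c) : Int) := by omega
    rw [heq]; exact hspec
  have hle := Nat.find_le (h := exists_estPremier (c + 1)) hwit
  omega

def ProchainPremierLoop (suivPremier : Int) : Int :=
  if EstPremier suivPremier then suivPremier else ProchainPremierLoop (suivPremier + 1)
termination_by Nat.find (exists_estPremier suivPremier)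
decreasing_by
  rename_i hfalse
  exact find_decrease suivPremier hfalse

def ProchainPremier (aNombre : Int) : Int := ProchainPremierLoop (aNombre + 1)

-- while lstfact[i] * alpha < aNombre: lstfact[i] = lstfact[i] * alpha
-- (fuel aNombre.toNat + 1 always suffices: the cell holds a prime ≥ 2 and at least doubles each pass)
def maxFactorInner (fuel : Nat) (aNombre : Int) (lstfact : List Int) (i alpha : Int) : List Int :=
  match fuel with
  | 0 => lstfact
  | f + 1 =>
      if PySem.List.pyGetD lstfact i 0 * alpha < aNombre then
        maxFactorInner f aNombre
          (PySem.List.pySetD lstfact i (PySem.List.pyGetD lstfact i 0 * alpha)) i alpha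
      else lstfact

-- while p < aNombre: append p, maximise the factor, chain to the next prime, multiply
-- (fuel aNombre.toNat + 1 always suffices: p strictly increases each pass)
def maxFactorLoop (fuel : Nat) (aNombre : Int) (lstfact : List Int) (p i maxfact : Int) : Int :=
  match fuel with
  | 0 => maxfact
  | f + 1 =>
    if p < aNombre then
      let lst1 := lstfact ++ [p]                                  -- lstfact.append(p)
      let alpha := p
      let lst2 := maxFactorInner (aNombre.toNat + 1) aNombre lst1 i alpha
      let p' := ProchainPremier p
      let maxfact' := maxfact * PySem.List.pyGetD lst2 i 0        -- lstfact[i]; i = len-1 is always in range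
      maxFactorLoop f aNombre lst2 p' (i + 1) maxfact'
    else maxfact

def maxFactor (aNombre : Int) : Int :=
  maxFactorLoop (aNombre.toNat + 1) aNombre [] (ProchainPremier 1) 0 1

-- ===== PORT B =====
-- cited by isPrimeLoop's termination argument
theorem isPrimeLoop_dec (p d : Int) (h : d * d ≤ p) :
    (p + 2 - (d + 1)).toNat < (p + 2 - d).toNat := by
  have hd : d ≤ d * d := by nlinarith [mul_self_nonneg d, mul_self_nonneg (d - 1)]
  omega

-- while d * d <= p: if p % d == 0: return False; d += 1
def isPrimeLoop (p d : Int) : Bool :=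
  if d * d ≤ p then
    if PySem.Int.mod p d == 0 then false else isPrimeLoop p (d + 1)
  else true
termination_by (p + 2 - d).toNat
decreasing_by exact isPrimeLoop_dec p d ‹d * d ≤ p›

def isPrimeB (p : Int) : Bool := isPrimeLoop p 2

-- q = p; while q * p < aNombre: q *= p   (same sufficient fuel as A's inner loop)
def bPow (fuel : Nat) (aNombre p q : Int) : Int :=
  match fuel with
  | 0 => q
  | f + 1 => if q * p < aNombre then bPow f aNombre p (q * p) else q

def maxFactor_alt (aNombre : Int) : Int :=
  (PySem.List.pyRange 2 aNombre 1).foldl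
    (fun result p =>
      if isPrimeB p then result * bPow (aNombre.toNat + 1) aNombre p p else result) 1

-- ===== PRECONDITION & SPEC =====
def Spec_maxFactor (aNombre : Int) (out : Int) : Prop := out = maxFactor_alt aNombre
instance (aNombre : Int) (out : Int) : Decidable (Spec_maxFactor aNombre out) := by unfold Spec_maxFactor; infer_instance

-- ===== CLAIM (what is proved, stated in full; the proofs are below) =====
def Claim_equal_maxFactor : Prop := ∀ (aNombre : Int), Dom_maxFactor aNombre → Spec_maxFactor aNombre (maxFactor aNombre)

-- ===== LEMMAS AND PROOFS =====

-- characterization of B's trial-division loop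
theorem isPrimeLoop_char (p d : Int) :
    2 ≤ d → (isPrimeLoop p d = true ↔
      ∀ e, d ≤ e → e * e ≤ p → ¬ PySem.Int.mod p e = 0) := by
  fun_induction isPrimeLoop p d with
  | case1 d hle hdvd =>
      intro _
      simp only [Bool.false_eq_true, false_iff]
      intro hall
      exact hall d le_rfl hle (by simpa using hdvd)
  | case2 d hle hdvd ih =>
      intro hd
      rw [ih (by omega)]
      have hmod : ¬ PySem.Int.mod p d = 0 := by simpa using hdvd
      constructor
      · intro hall e he1 he2
        rcases eq_or_lt_of_le he1 with rfl | hgt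
        · exact hmod
        · exact hall e (by omega) he2
      · intro hall e he1 he2
        exact hall e (by omega) he2
  | case3 d hle =>
      intro hd
      simp only [true_iff]
      intro e he1 he2
      have : d * d ≤ e * e := mul_le_mul he1 he1 (by omega) (by omega)
      omega

-- characterization of A's trial-division loop (odd steps from p)
theorem estPremierLoop_char (n p mi : Int) :
    EstPremierLoop n p mi = true ↔
      ∀ e, p ≤ e → e < mi → (e - p) % 2 = 0 → ¬ PySem.Int.mod n e = 0 := by
  fun_induction EstPremierLoop n p mi with
  | case1 p hlt hdvd =>
      simp only [Bool.false_eq_true, false_iff]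
      intro hall
      exact hall p le_rfl hlt (by omega) (by simpa using hdvd)
  | case2 p hlt hdvd ih =>
      rw [ih]
      have hmod : ¬ PySem.Int.mod n p = 0 := by simpa using hdvd
      constructor
      · intro hall e he1 he2 hpar
        rcases eq_or_lt_of_le he1 with rfl | hgt
        · exact hmod
        · exact hall e (by omega) he2 (by omega)
      · intro hall e he1 he2 hpar
        exact hall e (by omega) he2 (by omega)
  | case3 p hlt =>
      simp only [true_iff]
      intro e he1 he2 _
      omega

-- the two primality tests agree on every k ≥ 2
theorem estPremier_eq_isPrimeB (k : Int) (hk : 2 ≤ k) : EstPremier k = isPrimeB k := by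
  by_cases h2 : k = 2
  · subst h2
    have h : isPrimeLoop 2 2 = true := by
      rw [isPrimeLoop.eq_def]; norm_num
    simp [EstPremier, isPrimeB, h]
  · by_cases heven : PySem.Int.mod k 2 = 0
    · have hdvd2 : (2 : Int) ∣ k := (PySem.Int.mod_eq_zero_iff_dvd k 2).mp heven
      have hfalse : isPrimeLoop k 2 = false := by
        rw [Bool.eq_false_iff]
        intro htrue
        exact ((isPrimeLoop_char k 2 le_rfl).mp htrue) 2 le_rfl (by omega) heven
      have hb1 : (k == 2) = false := by simp only [beq_eq_false_iff_ne, ne_eq]; exact h2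
      have hb2 : (PySem.Int.mod k 2 == 0) = true := by
        simp only [beq_iff_eq]; exact heven
      simp only [EstPremier, isPrimeB, hb1, hb2, Bool.false_eq_true, if_false, if_true, hfalse]
    · have hoddk : ¬ (2 : Int) ∣ k := fun h => heven ((PySem.Int.mod_eq_zero_iff_dvd k 2).mpr h)
      have hk3 : 3 ≤ k := by omega
      have hfd : PySem.Int.floordiv k 2 = k / 2 := PySem.Int.floordiv_eq_ediv_of_pos (by norm_num)
      have hEP : EstPremier k = EstPremierLoop k 3 (PySem.Int.floordiv k 2) := by
        have hb1 : (k == 2) = false := by simp only [beq_eq_false_iff_ne, ne_eq]; exact h2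
        have hb2 : (PySem.Int.mod k 2 == 0) = false := by
          simp only [beq_eq_false_iff_ne, ne_eq]; exact heven
        simp only [EstPremier, hb1, hb2, Bool.false_eq_true, if_false]
      rw [hEP, isPrimeB]
      rw [Bool.eq_iff_iff, estPremierLoop_char, isPrimeLoop_char k 2 le_rfl, hfd]
      constructor
      · intro hA e he2 hee hmod
        have hdvd : e ∣ k := (PySem.Int.mod_eq_zero_iff_dvd k e).mp hmod
        have heodd : ¬ (2 : Int) ∣ e := fun h => hoddk (dvd_trans h hdvd)
        have he3 : 3 ≤ e := by omega
        have h3e : 3 * e ≤ e * e := by nlinarith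
        exact hA e he3 (by omega) (by omega) hmod
      · intro hB e he3 helt hpar hmod
        have hdvd : e ∣ k := (PySem.Int.mod_eq_zero_iff_dvd k e).mp hmod
        obtain ⟨c, hc⟩ := hdvd
        have hc0 : 0 < c := by nlinarith
        have hc1 : c ≠ 1 := by intro h; rw [h, mul_one] at hc; omega
        have hc2 : c ≠ 2 := by intro h; rw [h] at hc; omega
        have hc3 : 3 ≤ c := by omega
        by_cases hce : c ≤ e
        · have hck : c * c ≤ k := by nlinarith
          exact hB c (by omega) hck
            ((PySem.Int.mod_eq_zero_iff_dvd k c).mpr ⟨e, by rw [hc]; ring⟩)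
        · have hek : e * e ≤ k := by nlinarith
          exact hB e (by omega) hek hmod

-- what A's inner loop does to the cell it works on (B's power loop, cell for cell)
theorem maxFactorInner_spec (f : Nat) : ∀ (n : Int) (lst : List Int) (i alpha : Int),
    0 ≤ i → i < (lst.length : Int) →
    PySem.List.pyGetD (maxFactorInner f n lst i alpha) i 0
        = bPow f n alpha (PySem.List.pyGetD lst i 0)
      ∧ (maxFactorInner f n lst i alpha).length = lst.length := by
  induction f with
  | zero => intro n lst i alpha h0 hlen; exact ⟨rfl, rfl⟩
  | succ f ih =>
    intro n lst i alpha h0 hlen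
    rw [maxFactorInner, bPow]
    by_cases hc : PySem.List.pyGetD lst i 0 * alpha < n
    · simp only [hc, if_true]
      have hset : PySem.List.pySetD lst i (PySem.List.pyGetD lst i 0 * alpha)
          = lst.set i.toNat (PySem.List.pyGetD lst i 0 * alpha) :=
        PySem.List.pySetD_of_nonneg _ _ h0
      have hlen' : (PySem.List.pySetD lst i (PySem.List.pyGetD lst i 0 * alpha)).length
          = lst.length := by rw [hset]; simp
      obtain ⟨g1, g2⟩ := ih n (PySem.List.pySetD lst i (PySem.List.pyGetD lst i 0 * alpha))
        i alpha h0 (by omega)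
      refine ⟨?_, by rw [g2, hlen']⟩
      rw [g1]
      have hget : PySem.List.pyGetD
          (PySem.List.pySetD lst i (PySem.List.pyGetD lst i 0 * alpha)) i 0
          = PySem.List.pyGetD lst i 0 * alpha := by
        rw [hset, PySem.List.pyGetD_eq_getElem _ _ h0 (by simpa using hlen)]
        simp [List.getElem_set_self]
      rw [hget]
    · simp only [hc, if_false]
      exact ⟨by trivial, by trivial⟩

-- B's fold step, named for the lemmas below
def bStep (n result p : Int) : Int :=
  if isPrimeB p then result * bPow (n.toNat + 1) n p p else result

theorem maxFactor_alt_eq_foldl (n : Int) :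
    maxFactor_alt n = (PySem.List.pyRange 2 n 1).foldl (bStep n) 1 := rfl

-- B's fold ignores the stretch between consecutive primes
theorem foldl_bStep_skip (n : Int) : ∀ (N : Nat) (q p' acc : Int), (p' - q).toNat = N →
    2 ≤ q → q ≤ p' → (∀ m, q ≤ m → m < p' → EstPremier m = false) →
    (PySem.List.pyRange q n 1).foldl (bStep n) acc
      = (PySem.List.pyRange p' n 1).foldl (bStep n) acc := by
  intro N
  induction N with
  | zero =>
      intro q p' acc hN h2 hle hfalse
      have : q = p' := by omega
      rw [this]
  | succ N ih =>
      intro q p' acc hN h2 hle hfalse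
      by_cases hqn : q < n
      · rw [PySem.List.pyRange_one_cons hqn]
        simp only [List.foldl_cons]
        have hq : isPrimeB q = false := by
          rw [← estPremier_eq_isPrimeB q h2]
          exact hfalse q le_rfl (by omega)
        have hbs : bStep n acc q = acc := by simp [bStep, hq]
        rw [hbs]
        exact ih (q + 1) p' acc (by omega) (by omega) (by omega)
          (fun m hm1 hm2 => hfalse m (by omega) hm2)
      · rw [PySem.List.pyRange_one_eq_nil (by omega),
           PySem.List.pyRange_one_eq_nil (by omega : n ≤ p')]

-- ProchainPremierLoop only moves forward
theorem prochainPremierLoop_ge (c : Int) : c ≤ ProchainPremierLoop c := by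
  generalize hN : Nat.find (exists_estPremier c) = N
  induction N using Nat.strong_induction_on generalizing c with
  | _ N ih =>
    rw [ProchainPremierLoop.eq_def]
    by_cases h : EstPremier c = true
    · simp only [h, if_true]
      exact le_rfl
    · simp only [h]
      have hlt := find_decrease c h
      have := ih (Nat.find (exists_estPremier (c + 1))) (by omega) (c + 1) rfl
      omega

-- ProchainPremierLoop returns an EstPremier number and skips only non-EstPremier ones
theorem prochainPremierLoop_spec (c : Int) :
    EstPremier (ProchainPremierLoop c) = true ∧
      ∀ m, c ≤ m → m < ProchainPremierLoop c → EstPremier m = false := by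
  generalize hN : Nat.find (exists_estPremier c) = N
  induction N using Nat.strong_induction_on generalizing c with
  | _ N ih =>
    rw [ProchainPremierLoop.eq_def]
    by_cases h : EstPremier c = true
    · simp only [h, if_true]
      exact ⟨by trivial, fun m h1 h2 => absurd h2 (by omega)⟩
    · simp only [h]
      have hlt := find_decrease c h
      obtain ⟨g1, g2⟩ := ih (Nat.find (exists_estPremier (c + 1))) (by omega) (c + 1) rfl
      refine ⟨g1, ?_⟩
      intro m h1 h2
      rcases eq_or_lt_of_le h1 with heq | hlt'
      · rw [← heq]
        simpa using h
      · exact g2 m (by omega) h2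

-- the main loop correspondence: A's chained loop = B's fold, from any EstPremier start
theorem maxFactorLoop_eq (n : Int) : ∀ (f : Nat) (p : Int) (lst : List Int) (i acc : Int),
    (n - p).toNat < f → i = (lst.length : Int) → 2 ≤ p → EstPremier p = true →
    maxFactorLoop f n lst p i acc = (PySem.List.pyRange p n 1).foldl (bStep n) acc := by
  intro f
  induction f with
  | zero => intro p lst i acc hN; omega
  | succ f ih =>
    intro p lst i acc hN hi hp hep
    rw [maxFactorLoop]
    by_cases hpn : p < n
    · simp only [hpn, if_true]
      have hi0 : 0 ≤ i := by omega
      have hlen1 : i < (((lst ++ [p]).length : Nat) : Int) := by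
        simp only [List.length_append, List.length_cons, List.length_nil]
        omega
      obtain ⟨hget, hlen⟩ := maxFactorInner_spec (n.toNat + 1) n (lst ++ [p]) i p hi0 hlen1
      have hcell : PySem.List.pyGetD (lst ++ [p]) i 0 = p := by
        rw [PySem.List.pyGetD_eq_getElem _ _ hi0 hlen1]
        have hteq : i.toNat = lst.length := by omega
        simp [hteq]
      rw [hcell] at hget
      obtain ⟨hp'ep, hp'min⟩ := prochainPremierLoop_spec (p + 1)
      have hge := prochainPremierLoop_ge (p + 1)
      have hIH := ih
        (ProchainPremier p)
        (maxFactorInner (n.toNat + 1) n (lst ++ [p]) i p)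
        (i + 1)
        (acc * PySem.List.pyGetD (maxFactorInner (n.toNat + 1) n (lst ++ [p]) i p) i 0)
        (by simp only [ProchainPremier]; omega)
        (by rw [hlen]; simp only [List.length_append, List.length_cons, List.length_nil]
            push_cast; omega)
        (by simp only [ProchainPremier]; omega)
        (by simpa only [ProchainPremier] using hp'ep)
      rw [hIH, hget]
      -- now the B side
      rw [PySem.List.pyRange_one_cons hpn]
      simp only [List.foldl_cons]
      have hbs : bStep n acc p = acc * bPow (n.toNat + 1) n p p := by
        have : isPrimeB p = true := by rw [← estPremier_eq_isPrimeB p hp]; exact hep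
        simp [bStep, this]
      rw [hbs]
      exact (foldl_bStep_skip n (ProchainPremierLoop (p + 1) - (p + 1)).toNat (p + 1)
        (ProchainPremier p) (acc * bPow (n.toNat + 1) n p p)
        (by simp only [ProchainPremier])
        (by omega)
        (by simp only [ProchainPremier]; omega)
        (by simpa only [ProchainPremier] using hp'min)).symm
    · simp only [hpn, if_false]
      rw [PySem.List.pyRange_one_eq_nil (by omega)]
      rfl

-- ===== VERDICT (by name: the statement is the Claim_ definition above) =====
theorem maxFactor_spec : Claim_equal_maxFactor := by
  intro n _
  unfold Spec_maxFactor
  have h2 : EstPremier 2 = true := by simp [EstPremier]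
  have hpp1 : ProchainPremier 1 = 2 := by
    rw [ProchainPremier]
    norm_num
    rw [ProchainPremierLoop.eq_def]
    simp [h2]
  rw [maxFactor, hpp1, maxFactor_alt_eq_foldl]
  exact maxFactorLoop_eq n (n.toNat + 1) 2 [] 0 1 (by omega) (by simp) le_rfl h2
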